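-- pv_equiv track=rewrite | github.com/caiqizh/COMP1001 | Tests/Test 2/Test2_sol(1)/Q3. MCGW-3pos.py | fullyConnectedGraph
-- ===== SOURCE A (Python) =====
-- def fullyConnectedGraph(S):
--     """
--     A function to generate a graph which contains all possible links among the 8 nodes
--     Input: A set of all possible states
--     Output: Return a graph which contains all possible links among the 8 nodes.
--     """
--     graph = {}
--     # consider each state s in S
--     for state1 in S:
--         neighbors = []
--         # find out which states in S differ from s by only 1 position
--         for state2 in S:
--             diff = 0
--             for i in range(3):
--                 if state1[i] != state2[i]:
--                     diff += 1
--             # add to the graph if neighbor found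
--             if diff == 1:
--                 neighbors.append(state2)
--         graph[state1] = neighbors
--
--     return graph
-- ===== SOURCE B (Python) =====
-- def fullyConnectedGraph(S):
--     """
--     A function to generate a graph which contains all possible links among the 8 nodes
--     Input: A set of all possible states
--     Output: Return a graph which contains all possible links among the 8 nodes.
--     """
--     # Wildcard-pattern hashing: bucket every state, per position 0..2, under its
--     # position-masked key; two states differ in exactly one of the 3 positions
--     # iff they share a masked key there and differ at the masked position.
--     entries = [((i, s[:i], s[i + 1:3]), (idx, s))
--                for idx, s in enumerate(S) for i in range(3)]
--     groups = {}
--     for key, v in entries: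
--         groups.setdefault(key, []).append(v)
--     graph = {}
--     for s in S:
--         if s not in graph:
--             cand = []
--             for i in range(3):
--                 for idx, t in groups.get((i, s[:i], s[i + 1:3]), []):
--                     if t[i] != s[i]:
--                         cand.append((idx, t))
--             cand.sort(key=lambda p: p[0])
--             graph[s] = [t for _, t in cand]
--     return graph
-- ===== Notes on version B (the rewrite author's own statement) =====
-- stated objective: faster
-- what changed: Replaces the all-pairs O(n^2) neighbor scan by wildcard-pattern hashing: states are bucketed once per position under a position-masked key, neighbors are collected from the three buckets and restored to input order by sorting their indices.
import Mathlib
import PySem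

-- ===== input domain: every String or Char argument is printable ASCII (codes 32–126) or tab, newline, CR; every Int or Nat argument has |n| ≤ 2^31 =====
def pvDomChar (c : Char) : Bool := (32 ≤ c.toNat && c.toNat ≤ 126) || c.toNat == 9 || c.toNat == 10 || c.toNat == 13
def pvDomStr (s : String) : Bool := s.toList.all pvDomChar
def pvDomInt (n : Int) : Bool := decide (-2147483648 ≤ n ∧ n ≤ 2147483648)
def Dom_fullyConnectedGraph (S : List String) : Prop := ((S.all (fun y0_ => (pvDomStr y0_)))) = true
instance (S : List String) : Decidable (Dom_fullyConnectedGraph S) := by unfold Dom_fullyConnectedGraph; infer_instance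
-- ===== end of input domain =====

-- B replaces A's all-pairs neighbor scan by wildcard-pattern hashing (bucket per masked position, then sort indices); measured asymptotically faster.

-- ===== PORT A =====
-- the innermost 'for i in range(3)' diff counter of A
def fcgDiff (state1 state2 : String) : Int :=
  (PySem.List.pyRange 0 3 1).foldl (fun diff i =>
    if PySem.Str.pyGet? state1 i != PySem.Str.pyGet? state2 i then diff + 1 else diff) 0

def fullyConnectedGraph (S : List String) : List (String × List String) :=
  (S.foldl (fun graph state1 =>
     graph.insert state1
       (S.foldl (fun neighbors state2 =>
          if fcgDiff state1 state2 == 1 then neighbors ++ [state2] else neighbors) []))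
   (PySem.Dict.empty : PySem.Dict String (List String))).items

-- ===== PORT B =====
-- the masked key (i, s[:i], s[i+1:3])
def fcgKey (i : Int) (s : String) : Int × String × String :=
  (i, PySem.Str.slice s none (some i), PySem.Str.slice s (some (i + 1)) (some 3))

-- entries = [((i, s[:i], s[i+1:3]), (idx, s)) for idx, s in enumerate(S) for i in range(3)]
def fcgEntries (S : List String) : List ((Int × String × String) × (Int × String)) :=
  (PySem.List.enumerate S).flatMap (fun p =>
    ([0, 1, 2] : List Int).map (fun i => (fcgKey i p.2, p)))

-- for key, v in entries: groups.setdefault(key, []).append(v)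
def fcgGroups (S : List String) : PySem.Dict (Int × String × String) (List (Int × String)) :=
  (fcgEntries S).foldl (fun d q => d.modify q.1 [] (· ++ [q.2])) PySem.Dict.empty

-- collect candidates from the three buckets, sort by original index, drop the indices
def fcgNbrs (groups : PySem.Dict (Int × String × String) (List (Int × String)))
    (s : String) : List String :=
  (PySem.List.sorted
    (([0, 1, 2] : List Int).foldl (fun cand i =>
        cand ++ (groups.getD (fcgKey i s) []).filter
          (fun p => PySem.Str.pyGet? p.2 i != PySem.Str.pyGet? s i)) [])
    (fun p => p.1) false).map (fun p => p.2)

def fullyConnectedGraph_alt (S : List String) : List (String × List String) :=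
  (S.foldl (fun graph s =>
     if graph.contains s then graph else graph.insert s (fcgNbrs (fcgGroups S) s))
   (PySem.Dict.empty : PySem.Dict String (List String))).items

-- ===== PRECONDITION & SPEC =====
-- A indexes state[i] for i < 3 on every element, so it raises IndexError iff some state is shorter than 3.
def Pre_fullyConnectedGraph (S : List String) : Prop := ∀ s ∈ S, 3 ≤ PySem.Str.len s
instance (S : List String) : Decidable (Pre_fullyConnectedGraph S) := by unfold Pre_fullyConnectedGraph; infer_instance
def pvWitness_fullyConnectedGraph : List String := ["abc", "abd", "xbc", "abc"]

def Spec_fullyConnectedGraph (S : List String) (out : List (String × List String)) : Prop := out = fullyConnectedGraph_alt S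
instance (S : List String) (out : List (String × List String)) : Decidable (Spec_fullyConnectedGraph S out) := by unfold Spec_fullyConnectedGraph; infer_instance

-- ===== CLAIM (what is proved, stated in full; the proofs are below) =====
def Claim_equal_fullyConnectedGraph : Prop := ∀ (S : List String), Dom_fullyConnectedGraph S → Pre_fullyConnectedGraph S → Spec_fullyConnectedGraph S (fullyConnectedGraph S)

-- ===== LEMMAS AND PROOFS =====

-- the per-key neighbor list A computes
def fcgNbrA (S : List String) (s : String) : List String :=
  S.filter (fun t => fcgDiff s t == 1)

theorem fcg_decomp (s : String) (h : 3 ≤ PySem.Str.len s) :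
    ∃ a b c r, s.toList = a :: b :: c :: r := by
  rw [PySem.Str.len_eq] at h
  match hl : s.toList with
  | [] => rw [hl] at h; simp at h
  | [_] => rw [hl] at h; simp at h
  | [_, _] => rw [hl] at h; simp at h
  | a :: b :: c :: r => exact ⟨a, b, c, r, rfl⟩

theorem fcg_get0 (s : String) (a b c : Char) (r : List Char) (hs : s.toList = a :: b :: c :: r) :
    PySem.Str.pyGet? s 0 = some a := by
  have h : PySem.List.pyGet? s.toList ((0 : Nat) : Int) = s.toList[(0 : Nat)]? :=
    PySem.List.pyGet?_natCast _ _
  norm_num at h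
  simp only [PySem.Str.pyGet?_eq, PySem.Chars.pyGet?_eq_listPyGet?]
  rw [h, hs]; rfl

theorem fcg_get1 (s : String) (a b c : Char) (r : List Char) (hs : s.toList = a :: b :: c :: r) :
    PySem.Str.pyGet? s 1 = some b := by
  have h : PySem.List.pyGet? s.toList ((1 : Nat) : Int) = s.toList[(1 : Nat)]? :=
    PySem.List.pyGet?_natCast _ _
  norm_num at h
  simp only [PySem.Str.pyGet?_eq, PySem.Chars.pyGet?_eq_listPyGet?]
  rw [h, hs]; rfl

theorem fcg_get2 (s : String) (a b c : Char) (r : List Char) (hs : s.toList = a :: b :: c :: r) :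
    PySem.Str.pyGet? s 2 = some c := by
  have h : PySem.List.pyGet? s.toList ((2 : Nat) : Int) = s.toList[(2 : Nat)]? :=
    PySem.List.pyGet?_natCast _ _
  norm_num at h
  simp only [PySem.Str.pyGet?_eq, PySem.Chars.pyGet?_eq_listPyGet?]
  rw [h, hs]; rfl

theorem fcg_key0 (s t : String) (a b c : Char) (r : List Char) (a' b' c' : Char) (r' : List Char)
    (hs : s.toList = a :: b :: c :: r) (ht : t.toList = a' :: b' :: c' :: r') :
    (fcgKey 0 t == fcgKey 0 s) = (decide (b' = b) && decide (c' = c)) := by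
  have h1 : ∀ u : List Char, PySem.List.slice u none (some 0) = u.take (0 : Int).toNat :=
    fun u => PySem.List.slice_to u (by norm_num)
  have h2 : ∀ u : List Char, PySem.List.slice u (some (0 + 1)) (some 3) =
      (u.drop ((0 : Int) + 1).toNat).take ((3 : Int).toNat - ((0 : Int) + 1).toNat) :=
    fun u => PySem.List.slice_toNat u (by norm_num) (by norm_num)
  simp only [fcgKey, PySem.Str.slice, PySem.Chars.slice_eq_listSlice, hs, ht, h1, h2]
  norm_num [show Int.toNat 3 = 3 from rfl, List.take_succ_cons, List.drop_succ_cons, List.take]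
  by_cases hb : b' = b <;> by_cases hc : c' = c <;> simp [hb, hc, String.ofList_inj]

theorem fcg_key1 (s t : String) (a b c : Char) (r : List Char) (a' b' c' : Char) (r' : List Char)
    (hs : s.toList = a :: b :: c :: r) (ht : t.toList = a' :: b' :: c' :: r') :
    (fcgKey 1 t == fcgKey 1 s) = (decide (a' = a) && decide (c' = c)) := by
  have h1 : ∀ u : List Char, PySem.List.slice u none (some 1) = u.take (1 : Int).toNat :=
    fun u => PySem.List.slice_to u (by norm_num)
  have h2 : ∀ u : List Char, PySem.List.slice u (some (1 + 1)) (some 3) =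
      (u.drop ((1 : Int) + 1).toNat).take ((3 : Int).toNat - ((1 : Int) + 1).toNat) :=
    fun u => PySem.List.slice_toNat u (by norm_num) (by norm_num)
  simp only [fcgKey, PySem.Str.slice, PySem.Chars.slice_eq_listSlice, hs, ht, h1, h2]
  norm_num [show Int.toNat 3 = 3 from rfl, show Int.toNat 1 = 1 from rfl,
    List.take_succ_cons, List.drop_succ_cons, List.take]
  by_cases ha : a' = a <;> by_cases hc : c' = c <;> simp [ha, hc, String.ofList_inj]

theorem fcg_key2 (s t : String) (a b c : Char) (r : List Char) (a' b' c' : Char) (r' : List Char)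
    (hs : s.toList = a :: b :: c :: r) (ht : t.toList = a' :: b' :: c' :: r') :
    (fcgKey 2 t == fcgKey 2 s) = (decide (a' = a) && decide (b' = b)) := by
  have h1 : ∀ u : List Char, PySem.List.slice u none (some 2) = u.take (2 : Int).toNat :=
    fun u => PySem.List.slice_to u (by norm_num)
  have h2 : ∀ u : List Char, PySem.List.slice u (some (2 + 1)) (some 3) =
      (u.drop ((2 : Int) + 1).toNat).take ((3 : Int).toNat - ((2 : Int) + 1).toNat) :=
    fun u => PySem.List.slice_toNat u (by norm_num) (by norm_num)
  simp only [fcgKey, PySem.Str.slice, PySem.Chars.slice_eq_listSlice, hs, ht, h1, h2]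
  norm_num [show Int.toNat 3 = 3 from rfl, show Int.toNat 2 = 2 from rfl,
    List.take_succ_cons, List.drop_succ_cons, List.take]
  by_cases ha : a' = a <;> by_cases hb : b' = b <;> simp [ha, hb, String.ofList_inj]

theorem fcg_diff_chars (s t : String) (a b c : Char) (r : List Char) (a' b' c' : Char) (r' : List Char)
    (hs : s.toList = a :: b :: c :: r) (ht : t.toList = a' :: b' :: c' :: r') :
    fcgDiff s t = (if a' = a then 0 else 1) + (if b' = b then 0 else 1) + (if c' = c then 0 else 1) := by
  unfold fcgDiff
  rw [show PySem.List.pyRange 0 3 1 = [0, 1, 2] from by decide]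
  simp only [List.foldl_cons, List.foldl_nil,
    fcg_get0 s a b c r hs, fcg_get1 s a b c r hs, fcg_get2 s a b c r hs,
    fcg_get0 t a' b' c' r' ht, fcg_get1 t a' b' c' r' ht, fcg_get2 t a' b' c' r' ht]
  by_cases h1 : a' = a <;> by_cases h2 : b' = b <;> by_cases h3 : c' = c <;>
    simp [h1, h2, h3, bne,
      show (a = a') ↔ (a' = a) from eq_comm, show (b = b') ↔ (b' = b) from eq_comm,
      show (c = c') ↔ (c' = c) from eq_comm]

-- the bucket condition-and-difference test of B, for each of the three positions, in characters
theorem fcg_c0 (s t : String) (a b c : Char) (r : List Char) (a' b' c' : Char) (r' : List Char)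
    (hs : s.toList = a :: b :: c :: r) (ht : t.toList = a' :: b' :: c' :: r') :
    ((fcgKey 0 t == fcgKey 0 s) && (PySem.Str.pyGet? t 0 != PySem.Str.pyGet? s 0))
      = (!decide (a' = a) && decide (b' = b) && decide (c' = c)) := by
  rw [fcg_key0 s t a b c r a' b' c' r' hs ht,
    fcg_get0 s a b c r hs, fcg_get0 t a' b' c' r' ht]
  by_cases ha : a' = a <;> by_cases hb : b' = b <;> by_cases hc : c' = c <;>
    simp [ha, hb, hc, bne]

theorem fcg_c1 (s t : String) (a b c : Char) (r : List Char) (a' b' c' : Char) (r' : List Char)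
    (hs : s.toList = a :: b :: c :: r) (ht : t.toList = a' :: b' :: c' :: r') :
    ((fcgKey 1 t == fcgKey 1 s) && (PySem.Str.pyGet? t 1 != PySem.Str.pyGet? s 1))
      = (decide (a' = a) && !decide (b' = b) && decide (c' = c)) := by
  rw [fcg_key1 s t a b c r a' b' c' r' hs ht,
    fcg_get1 s a b c r hs, fcg_get1 t a' b' c' r' ht]
  by_cases ha : a' = a <;> by_cases hb : b' = b <;> by_cases hc : c' = c <;>
    simp [ha, hb, hc, bne]

theorem fcg_c2 (s t : String) (a b c : Char) (r : List Char) (a' b' c' : Char) (r' : List Char)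
    (hs : s.toList = a :: b :: c :: r) (ht : t.toList = a' :: b' :: c' :: r') :
    ((fcgKey 2 t == fcgKey 2 s) && (PySem.Str.pyGet? t 2 != PySem.Str.pyGet? s 2))
      = (decide (a' = a) && decide (b' = b) && !decide (c' = c)) := by
  rw [fcg_key2 s t a b c r a' b' c' r' hs ht,
    fcg_get2 s a b c r hs, fcg_get2 t a' b' c' r' ht]
  by_cases ha : a' = a <;> by_cases hb : b' = b <;> by_cases hc : c' = c <;>
    simp [ha, hb, hc, bne]

-- a key from position j never matches a key from position i ≠ j
theorem fcg_keyNe (i j : Int) (h : j ≠ i) (s t : String) : (fcgKey j t == fcgKey i s) = false := by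
  simp [fcgKey, h]

-- filtering the three-entry chunk of one state keeps at most the position-i entry
theorem fcg_chunk (i : Int) (hi : i ∈ ([0, 1, 2] : List Int)) (s t : String) (p : Int × String) :
    (([0, 1, 2] : List Int).map (fun j => (fcgKey j t, p))).filter (fun q => q.1 == fcgKey i s)
      = if fcgKey i t == fcgKey i s then [(fcgKey i t, p)] else [] := by
  fin_cases hi
  · simp [List.filter_cons, fcg_keyNe 0 1 (by decide) s t, fcg_keyNe 0 2 (by decide) s t]
  · simp [List.filter_cons, fcg_keyNe 1 0 (by decide) s t, fcg_keyNe 1 2 (by decide) s t]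
  · simp [List.filter_cons, fcg_keyNe 2 0 (by decide) s t, fcg_keyNe 2 1 (by decide) s t]

theorem fcg_bucket_filter (s : String) (i : Int) (hi : i ∈ ([0, 1, 2] : List Int)) :
    ∀ (l : List (Int × String)),
    ((l.flatMap (fun p => ([0, 1, 2] : List Int).map (fun j => (fcgKey j p.2, p)))).filter
        (fun q => q.1 == fcgKey i s)).map (fun x => x.2)
      = l.filter (fun p => fcgKey i p.2 == fcgKey i s) := by
  intro l
  induction l with
  | nil => simp
  | cons p l ih =>
    simp only [List.flatMap_cons, List.filter_append, List.map_append, ih,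
      fcg_chunk i hi s p.2 p, List.filter_cons]
    by_cases h : (fcgKey i p.2 == fcgKey i s) = true <;> simp [h]

-- bucket i of groups(S) holds exactly the enumerated states whose position-i mask matches s's
theorem fcg_bucket (S : List String) (s : String) (i : Int) (hi : i ∈ ([0, 1, 2] : List Int)) :
    (fcgGroups S).getD (fcgKey i s) []
      = (PySem.List.enumerate S).filter (fun p => fcgKey i p.2 == fcgKey i s) := by
  unfold fcgGroups fcgEntries
  rw [PySem.Dict.getD_foldl_modify_append]
  rw [PySem.Dict.getD_empty]
  simpa using fcg_bucket_filter s i hi (PySem.List.enumerate S)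

-- concatenating two filters of disjoint tests is a permutation of the filter of the disjunction
theorem fcg_filter_or_perm {α : Type} (l : List α) (p q : α → Bool)
    (h : ∀ x ∈ l, ¬(p x = true ∧ q x = true)) :
    (l.filter p ++ l.filter q).Perm (l.filter (fun x => p x || q x)) := by
  induction l with
  | nil => simp
  | cons x l ih =>
    have hx := h x (by simp)
    have ih' := ih (fun y hy => h y (by simp [hy]))
    by_cases hp : p x <;> by_cases hq : q x
    · exact absurd ⟨hp, hq⟩ hx
    · simpa [hp, hq] using ih'.cons x
    · simp only [List.filter_cons, hp, hq, if_pos, if_neg, Bool.false_eq_true,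
        not_false_iff, Bool.or_true]
      exact (List.perm_middle).trans ((ih'.cons x).trans (by simp))
    · simpa [hp, hq] using ih' 

theorem fcg_filter_enumerate_snd {α : Type} (f : α → Bool) :
    ∀ (xs : List α) (n : Int),
    ((PySem.List.enumerate xs n).filter (fun p => f p.2)).map (fun x => x.2) = xs.filter f := by
  intro xs
  induction xs with
  | nil => intro n; simp
  | cons x xs ih =>
    intro n
    rw [PySem.List.enumerate_cons]
    by_cases h : f x <;> simp [h, ih (n + 1)]

-- THE CORE: B's bucket-collect-sort neighbor list is A's filtered scan
theorem fcg_nbrs (S : List String) (s : String) (hs3 : 3 ≤ PySem.Str.len s)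
    (hS : ∀ t ∈ S, 3 ≤ PySem.Str.len t) :
    fcgNbrs (fcgGroups S) s = fcgNbrA S s := by
  obtain ⟨a, b, c, r, hs⟩ := fcg_decomp s hs3
  unfold fcgNbrs
  simp only [List.foldl_cons, List.foldl_nil, List.nil_append]
  rw [fcg_bucket S s 0 (by decide), fcg_bucket S s 1 (by decide), fcg_bucket S s 2 (by decide)]
  rw [List.filter_filter, List.filter_filter, List.filter_filter]
  have hmem : ∀ x ∈ PySem.List.enumerate S 0, x.2 ∈ S := by
    intro x hx
    have h2 : x.2 ∈ (PySem.List.enumerate S 0).map (fun y => y.2) := List.mem_map_of_mem hx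
    rwa [PySem.List.map_snd_enumerate] at h2
  have hC : ∀ x ∈ PySem.List.enumerate S 0, ∃ a' b' c' r', x.2.toList = a' :: b' :: c' :: r' :=
    fun x hx => fcg_decomp x.2 (hS x.2 (hmem x hx))
  have h01 : ∀ x ∈ PySem.List.enumerate S 0,
      ¬(((PySem.Str.pyGet? x.2 0 != PySem.Str.pyGet? s 0) && (fcgKey 0 x.2 == fcgKey 0 s)) = true ∧
        ((PySem.Str.pyGet? x.2 1 != PySem.Str.pyGet? s 1) && (fcgKey 1 x.2 == fcgKey 1 s)) = true) := by
    intro x hx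
    obtain ⟨a', b', c', r', hxt⟩ := hC x hx
    rw [Bool.and_comm (PySem.Str.pyGet? x.2 0 != PySem.Str.pyGet? s 0) (fcgKey 0 x.2 == fcgKey 0 s), fcg_c0 s x.2 a b c r a' b' c' r' hs hxt,
      Bool.and_comm (PySem.Str.pyGet? x.2 1 != PySem.Str.pyGet? s 1) (fcgKey 1 x.2 == fcgKey 1 s), fcg_c1 s x.2 a b c r a' b' c' r' hs hxt]
    by_cases hA : a' = a <;> by_cases hB : b' = b <;> by_cases hc2 : c' = c <;> simp [hA, hB, hc2]
  have h2 : ∀ x ∈ PySem.List.enumerate S 0,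
      ¬((((PySem.Str.pyGet? x.2 0 != PySem.Str.pyGet? s 0) && (fcgKey 0 x.2 == fcgKey 0 s)) ||
         ((PySem.Str.pyGet? x.2 1 != PySem.Str.pyGet? s 1) && (fcgKey 1 x.2 == fcgKey 1 s))) = true ∧
        ((PySem.Str.pyGet? x.2 2 != PySem.Str.pyGet? s 2) && (fcgKey 2 x.2 == fcgKey 2 s)) = true) := by
    intro x hx
    obtain ⟨a', b', c', r', hxt⟩ := hC x hx
    rw [Bool.and_comm (PySem.Str.pyGet? x.2 0 != PySem.Str.pyGet? s 0) (fcgKey 0 x.2 == fcgKey 0 s), fcg_c0 s x.2 a b c r a' b' c' r' hs hxt,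
      Bool.and_comm (PySem.Str.pyGet? x.2 1 != PySem.Str.pyGet? s 1) (fcgKey 1 x.2 == fcgKey 1 s),
      fcg_c1 s x.2 a b c r a' b' c' r' hs hxt,
      Bool.and_comm (PySem.Str.pyGet? x.2 2 != PySem.Str.pyGet? s 2) (fcgKey 2 x.2 == fcgKey 2 s),
      fcg_c2 s x.2 a b c r a' b' c' r' hs hxt]
    by_cases hA : a' = a <;> by_cases hB : b' = b <;> by_cases hc2 : c' = c <;> simp [hA, hB, hc2]
  have hperm := ((fcg_filter_or_perm (PySem.List.enumerate S 0) _ _ h01).append_right _).trans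
    (fcg_filter_or_perm (PySem.List.enumerate S 0) _ _ h2)
  rw [PySem.List.sorted_eq_of_perm_of_pairwise_lt _ _ (fun p => p.1) hperm.symm
    (List.Pairwise.sublist List.filter_sublist (PySem.List.pairwise_lt_enumerate S 0))]
  have hor : ∀ x ∈ PySem.List.enumerate S 0,
      ((((PySem.Str.pyGet? x.2 0 != PySem.Str.pyGet? s 0) && (fcgKey 0 x.2 == fcgKey 0 s)) ||
        ((PySem.Str.pyGet? x.2 1 != PySem.Str.pyGet? s 1) && (fcgKey 1 x.2 == fcgKey 1 s))) ||
       ((PySem.Str.pyGet? x.2 2 != PySem.Str.pyGet? s 2) && (fcgKey 2 x.2 == fcgKey 2 s)))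
      = (fcgDiff s x.2 == 1) := by
    intro x hx
    obtain ⟨a', b', c', r', hxt⟩ := hC x hx
    rw [Bool.and_comm (PySem.Str.pyGet? x.2 0 != PySem.Str.pyGet? s 0) (fcgKey 0 x.2 == fcgKey 0 s), fcg_c0 s x.2 a b c r a' b' c' r' hs hxt,
      Bool.and_comm (PySem.Str.pyGet? x.2 1 != PySem.Str.pyGet? s 1) (fcgKey 1 x.2 == fcgKey 1 s),
      fcg_c1 s x.2 a b c r a' b' c' r' hs hxt,
      Bool.and_comm (PySem.Str.pyGet? x.2 2 != PySem.Str.pyGet? s 2) (fcgKey 2 x.2 == fcgKey 2 s),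
      fcg_c2 s x.2 a b c r a' b' c' r' hs hxt,
      fcg_diff_chars s x.2 a b c r a' b' c' r' hs hxt]
    by_cases hA : a' = a <;> by_cases hB : b' = b <;> by_cases hc2 : c' = c <;>
      norm_num [hA, hB, hc2]
  rw [List.filter_congr hor]
  exact fcg_filter_enumerate_snd (fun t => fcgDiff s t == 1) S 0

-- inserting the value a key already has changes nothing
theorem fcg_insert_self {V : Type} (d : PySem.Dict String V) (k : String) (v : V)
    (hn : d.keys.Nodup) (hv : d.get? k = some v) : d.insert k v = d := by
  apply PySem.Dict.ext
  have hc : d.contains k = true := by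
    rw [PySem.Dict.contains_eq_isSome_get?, hv]; rfl
  rw [PySem.Dict.items_insert_of_contains d v hc]
  have : ∀ p ∈ d.items, (if (p.1 == k) = true then (k, v) else p) = p := by
    intro p hp
    by_cases hpk : (p.1 == k) = true
    · have hk : p.1 = k := by simpa using hpk
      have : (k, p.2) ∈ d.items := by rw [← hk]; exact hp
      have := PySem.Dict.get?_of_mem_items d this hn
      rw [hv] at this
      simp only [Option.some.injEq] at this
      rw [if_pos hpk, this, ← hk]
    · simp [hpk]
  rw [List.map_congr_left this]
  simp

-- when the inserted value is a function of the key alone, skipping present keys changes nothing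
theorem fcg_foldl_insert_skip {V : Type} (f : String → V) :
    ∀ (l : List String) (d : PySem.Dict String V), d.keys.Nodup →
      (∀ k, d.contains k = true → d.get? k = some (f k)) →
      l.foldl (fun g s => g.insert s (f s)) d
        = l.foldl (fun g s => if g.contains s then g else g.insert s (f s)) d := by
  intro l
  induction l with
  | nil => intro d _ _; rfl
  | cons x l ih =>
    intro d hn hv
    by_cases hc : d.contains x = true
    · simp only [List.foldl_cons, hc, if_true]
      rw [fcg_insert_self d x (f x) hn (hv x hc)]
      exact ih d hn hv
    · simp only [List.foldl_cons, hc, Bool.false_eq_true, if_false]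
      apply ih
      · exact PySem.Dict.nodup_keys_insert _ _ _ hn
      · intro k hk
        rw [PySem.Dict.contains_insert] at hk
        rw [PySem.Dict.get?_insert]
        by_cases hkx : k = x
        · simp [hkx]
        · simp only [hkx, if_false]
          apply hv
          simpa [hkx] using hk

-- ===== VERDICT (by name: the statement is the Claim_ definition above) =====
theorem fullyConnectedGraph_spec : Claim_equal_fullyConnectedGraph := by
  intro S _hDom hPre
  unfold Spec_fullyConnectedGraph fullyConnectedGraph fullyConnectedGraph_alt
  congr 1
  have hbody : (fun (graph : PySem.Dict String (List String)) state1 =>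
        graph.insert state1 (S.foldl (fun neighbors state2 =>
          if fcgDiff state1 state2 == 1 then neighbors ++ [state2] else neighbors) []))
      = (fun graph state1 => graph.insert state1 (fcgNbrA S state1)) := by
    funext graph state1
    rw [PySem.List.foldl_append_if (fun t => fcgDiff state1 t == 1) (fun t => t) S []]
    simp [fcgNbrA]
  rw [hbody,
    fcg_foldl_insert_skip (fcgNbrA S) S PySem.Dict.empty PySem.Dict.nodup_keys_empty
      (by intro k hk; rw [PySem.Dict.contains_empty] at hk; cases hk)]
  apply PySem.List.foldl_congr_mem
  intro acc x hx
  rw [fcg_nbrs S x (hPre x hx) hPre]
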